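-- pv_equiv track=rewrite | github.com/gaeunpark924/PS-practice | 브루트포스알고리즘/DNA_링트와스타트.py | power_search
-- ===== SOURCE A (Python) =====
-- def power_search(s, player, idx, power):
--     for i in range(idx-1,-1,-1):
--         x = player[idx]-1
--         y = player[i]-1
--         power += s[x][y] if x < y else s[y][x]
--     idx += 1
--     if idx < len(player):
--         power = power_search(s, player,idx, power)
--     return power
-- ===== SOURCE B (Python) =====
-- def power_search(s, player, idx, power):
--     for j in range(idx, len(player)):
--         for i in range(j):
--             x = player[j] - 1
--             y = player[i] - 1
--             power += s[x][y] if x < y else s[y][x]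
--     return power
-- ===== Notes on version B (the rewrite author's own statement) =====
-- stated objective: simpler
-- what changed: Replaced A's tail recursion over idx with its descending inner scan by a single non-recursive double for-loop over index pairs (ascending inner scan), threading power directly.
import Mathlib
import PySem

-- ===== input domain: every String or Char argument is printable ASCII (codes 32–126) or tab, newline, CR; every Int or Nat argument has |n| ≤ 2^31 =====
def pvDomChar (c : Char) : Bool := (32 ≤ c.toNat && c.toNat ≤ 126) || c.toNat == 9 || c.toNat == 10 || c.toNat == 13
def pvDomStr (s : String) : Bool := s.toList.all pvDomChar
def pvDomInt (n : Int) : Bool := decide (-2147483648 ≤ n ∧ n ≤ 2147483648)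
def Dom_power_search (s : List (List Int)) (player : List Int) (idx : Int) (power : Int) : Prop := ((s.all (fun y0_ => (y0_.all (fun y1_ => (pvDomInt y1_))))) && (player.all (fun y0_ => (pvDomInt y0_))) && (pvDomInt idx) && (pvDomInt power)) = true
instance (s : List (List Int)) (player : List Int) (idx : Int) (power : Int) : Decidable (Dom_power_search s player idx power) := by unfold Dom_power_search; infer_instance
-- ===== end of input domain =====

-- B replaces A's tail recursion over idx (with a descending inner scan) by one
-- non-recursive double loop over index pairs: simpler, same quadratic cost.

-- ===== PORT A =====
-- literal port of A's recursion; pyGetD defaults (0 / []) are never hit under Pre_,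
-- which excludes exactly the inputs where the Python raises IndexError
def power_search (s : List (List Int)) (player : List Int) (idx : Int) (power : Int) : Int :=
  let power' := (PySem.List.pyRange (idx - 1) (-1) (-1)).foldl (fun acc i =>
      let x := PySem.List.pyGetD player idx 0 - 1
      let y := PySem.List.pyGetD player i 0 - 1
      acc + (if x < y then PySem.List.pyGetD (PySem.List.pyGetD s x []) y 0
             else PySem.List.pyGetD (PySem.List.pyGetD s y []) x 0)) power
  if _h : idx + 1 < (player.length : Int) then power_search s player (idx + 1) power'
  else power'
termination_by ((player.length : Int) - idx).toNat
decreasing_by omega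

-- ===== PORT B =====
def power_search_alt (s : List (List Int)) (player : List Int) (idx : Int) (power : Int) : Int :=
  (PySem.List.pyRange idx (player.length : Int) 1).foldl (fun pw j =>
    (PySem.List.pyRange 0 j 1).foldl (fun pw2 i =>
      let x := PySem.List.pyGetD player j 0 - 1
      let y := PySem.List.pyGetD player i 0 - 1
      pw2 + (if x < y then PySem.List.pyGetD (PySem.List.pyGetD s x []) y 0
             else PySem.List.pyGetD (PySem.List.pyGetD s y []) x 0)) pw) power

-- ===== PRECONDITION & SPEC =====
-- Pre_ holds exactly on the inputs where the Python A returns normally: idx in range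
-- (player[idx] in the first loop body), and every matrix access s[x][y]/s[y][x] that the
-- recursion performs (pairs of positions i < j with idx ≤ j) lands on an existing entry
-- (Python wraps negative indices; both programs wrap identically).
def Pre_power_search (s : List (List Int)) (player : List Int) (idx : Int) (power : Int) : Prop :=
  (player = [] → idx ≤ 0) ∧ (player ≠ [] → idx < (player.length : Int)) ∧
  (∀ j : Nat, j < player.length → ∀ i : Nat, i < j → idx ≤ (j : Int) →
    (let x := PySem.List.pyGetD player (j : Int) 0 - 1
     let y := PySem.List.pyGetD player (i : Int) 0 - 1
     let a := if x < y then x else y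
     let b := if x < y then y else x
     (-(s.length : Int) ≤ a ∧ a < (s.length : Int)) ∧
     (-((PySem.List.pyGetD s a []).length : Int) ≤ b ∧ b < ((PySem.List.pyGetD s a []).length : Int))))
instance (s : List (List Int)) (player : List Int) (idx : Int) (power : Int) : Decidable (Pre_power_search s player idx power) := by unfold Pre_power_search; infer_instance
def pvWitness_power_search : List (List Int) × List Int × Int × Int := ([[0, 1], [2, 0]], [1, 2], 0, 0)

def Spec_power_search (s : List (List Int)) (player : List Int) (idx : Int) (power : Int) (out : Int) : Prop := out = power_search_alt s player idx power
instance (s : List (List Int)) (player : List Int) (idx : Int) (power : Int) (out : Int) : Decidable (Spec_power_search s player idx power out) := by unfold Spec_power_search; infer_instance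

-- ===== CLAIM (what is proved, stated in full; the proofs are below) =====
def Claim_equal_power_search : Prop := ∀ (s : List (List Int)) (player : List Int) (idx : Int) (power : Int), Dom_power_search s player idx power → Pre_power_search s player idx power → Spec_power_search s player idx power (power_search s player idx power)

-- ===== LEMMAS AND PROOFS =====

-- the affinity added for the pair of players at positions j (later) and i (earlier)
def pvTerm (s : List (List Int)) (player : List Int) (j i : Int) : Int :=
  let x := PySem.List.pyGetD player j 0 - 1
  let y := PySem.List.pyGetD player i 0 - 1
  if x < y then PySem.List.pyGetD (PySem.List.pyGetD s x []) y 0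
  else PySem.List.pyGetD (PySem.List.pyGetD s y []) x 0

def pvT (s : List (List Int)) (player : List Int) (j : Int) : Int :=
  ((PySem.List.pyRange 0 j 1).map (pvTerm s player j)).sum

def pvS (s : List (List Int)) (player : List Int) (idx : Int) : Int :=
  ((PySem.List.pyRange idx (player.length : Int) 1).map (pvT s player)).sum

lemma pyRange_one_nil {a b : Int} (h : b ≤ a) : PySem.List.pyRange a b 1 = [] := by
  rw [PySem.List.pyRange_of_pos a b one_pos, if_neg (by omega)]
  simp

lemma pyRange_down (n : Int) :
    PySem.List.pyRange (n - 1) (-1) (-1) = (PySem.List.pyRange 0 n 1).reverse := by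
  by_cases h : n ≤ 0
  · rw [pyRange_one_nil h]
    simp [PySem.List.pyRange]
    omega
  · rw [PySem.List.pyRange_of_pos 0 n one_pos, if_pos (by omega)]
    simp only [PySem.List.pyRange, if_neg (by norm_num : ¬ ((-1 : Int) = 0))]
    rw [if_neg (by omega : ¬ (0:Int) < -1), if_pos (by omega : (-1:Int) < n - 1)]
    apply List.ext_getElem
    · simp
    · intro i h1 h2
      simp at h1 h2 ⊢
      omega

lemma B_sum (s : List (List Int)) (player : List Int) (idx power : Int) :
    power_search_alt s player idx power = power + pvS s player idx := by
  unfold power_search_alt pvS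
  rw [PySem.List.foldl_congr_mem _ _ (fun pw j => pw + pvT s player j) _ (by
    intro pw j _
    simpa [pvT, pvTerm] using
      PySem.List.foldl_add (PySem.List.pyRange 0 j 1) (pvTerm s player j) pw)]
  exact PySem.List.foldl_add _ _ _

lemma A_sum (s : List (List Int)) (player : List Int) (n : Nat) :
    ∀ idx power : Int, (((player.length : Int) - idx).toNat = n) →
      (idx < (player.length : Int) ∨ (player = [] ∧ idx ≤ 0)) →
      power_search s player idx power = power + pvS s player idx := by
  induction n with
  | zero =>
    intro idx power h0 hd
    rcases hd with hlt | ⟨hnil, hle⟩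
    · omega
    · subst hnil
      simp only [List.length_nil, Nat.cast_zero] at h0 ⊢
      have hidx : idx = 0 := by omega
      subst hidx
      rw [power_search]
      rw [show ((0:Int) - 1) = (0:Int) - 1 from rfl, pyRange_down 0, pyRange_one_nil le_rfl]
      simp [pvS]
  | succ n ih =>
    intro idx power hn hd
    rw [power_search]
    have hinner : ∀ acc : Int,
        (PySem.List.pyRange (idx - 1) (-1) (-1)).foldl (fun acc i =>
          let x := PySem.List.pyGetD player idx 0 - 1
          let y := PySem.List.pyGetD player i 0 - 1
          acc + (if x < y then PySem.List.pyGetD (PySem.List.pyGetD s x []) y 0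
                 else PySem.List.pyGetD (PySem.List.pyGetD s y []) x 0)) acc
        = acc + pvT s player idx := by
      intro acc
      rw [pyRange_down idx]
      simpa [pvT, pvTerm, List.sum_reverse] using
        PySem.List.foldl_add (PySem.List.pyRange 0 idx 1).reverse (pvTerm s player idx) acc
    simp only [hinner]
    by_cases hlt : idx + 1 < (player.length : Int)
    · rw [dif_pos hlt]
      rw [ih (idx + 1) (power + pvT s player idx) (by omega) (Or.inl hlt)]
      have hcons : pvS s player idx = pvT s player idx + pvS s player (idx + 1) := by
        unfold pvS
        rw [PySem.List.pyRange_one_cons (by omega : idx < (player.length : Int))]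
        simp
      rw [hcons]; ring
    · rw [dif_neg hlt]
      rcases hd with hlt' | ⟨hnil, hle⟩
      · -- last step: player.length = idx + 1
        have hcons : pvS s player idx = pvT s player idx := by
          unfold pvS
          rw [PySem.List.pyRange_one_cons hlt', pyRange_one_nil (by omega)]
          simp
        rw [hcons]
      · -- empty player, idx ∈ {-1, 0}: both sides add nothing
        subst hnil
        simp only [List.length_nil, Nat.cast_zero] at hlt hn ⊢
        have hT : pvT s [] idx = 0 := by
          unfold pvT
          rw [pyRange_one_nil (by omega)]
          simp
        have hS : pvS s [] idx = 0 := by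
          unfold pvS
          simp only [List.length_nil, Nat.cast_zero]
          apply List.sum_eq_zero
          intro x hx
          rcases List.mem_map.mp hx with ⟨j, hj, rfl⟩
          have := PySem.List.mem_pyRange_one.mp hj
          unfold pvT
          rw [pyRange_one_nil (by omega)]
          simp
        rw [hT, hS]

-- ===== VERDICT (by name: the statement is the Claim_ definition above) =====
theorem power_search_spec : Claim_equal_power_search := by
  intro s player idx power _hDom hPre
  unfold Spec_power_search
  obtain ⟨h1, h2, _⟩ := hPre
  have hd : idx < (player.length : Int) ∨ (player = [] ∧ idx ≤ 0) := by
    rcases List.eq_nil_or_concat player with hnil | ⟨_, _, rfl⟩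
    · exact Or.inr ⟨hnil, h1 hnil⟩
    · exact Or.inl (h2 (by simp))
  rw [B_sum]
  exact A_sum s player (((player.length : Int) - idx).toNat) idx power rfl hd
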